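-- pv_equiv track=rewrite | github.com/alune1212/bank-template-processing | src/bank_template_processing/merge_folder.py | _split_prefix_to_unit_and_template
-- ===== SOURCE A (Python) =====
-- class MergeFolderError(Exception):
--     """批量合并模式错误。"""
--
--     pass
--
-- def _split_prefix_to_unit_and_template(prefix: str, unit_names: list[str]) -> tuple[str, str]:
--     for unit_name in sorted(unit_names, key=len, reverse=True):
--         marker = f"{unit_name}_"
--         if prefix.startswith(marker):
--             template_name = prefix[len(marker) :]
--             if not template_name:
--                 raise MergeFolderError(f"文件名前缀缺少模板名称: {prefix}")
--             return str(unit_name), str(template_name)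
--
--     raise MergeFolderError(f"文件名前缀无法匹配单位名称: {prefix}")
-- ===== SOURCE B (Python) =====
-- class MergeFolderError(Exception):
--     """批量合并模式错误。"""
--
--     pass
--
--
-- def _split_prefix_to_unit_and_template(prefix: str, unit_names: list[str]) -> tuple[str, str]:
--     # One pass, no sorting: keep the longest unit name whose marker is a prefix.
--     best = None
--     best_len = -1
--     for unit_name in unit_names:
--         if len(unit_name) > best_len and prefix.startswith(unit_name + "_"):
--             best = unit_name
--             best_len = len(unit_name)
--     if best is None:
--         raise MergeFolderError(f"文件名前缀无法匹配单位名称: {prefix}")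
--     template_name = prefix[best_len + 1 :]
--     if not template_name:
--         raise MergeFolderError(f"文件名前缀缺少模板名称: {prefix}")
--     return str(best), str(template_name)
-- ===== Notes on version B (the rewrite author's own statement) =====
-- stated objective: simpler
-- what changed: Replaces the length-sort plus first-match scan with a single unsorted pass that keeps the longest matching unit name (any two equal-length matches are the same string, so the result is identical), raising the same errors on no match or empty template.
import Mathlib
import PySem

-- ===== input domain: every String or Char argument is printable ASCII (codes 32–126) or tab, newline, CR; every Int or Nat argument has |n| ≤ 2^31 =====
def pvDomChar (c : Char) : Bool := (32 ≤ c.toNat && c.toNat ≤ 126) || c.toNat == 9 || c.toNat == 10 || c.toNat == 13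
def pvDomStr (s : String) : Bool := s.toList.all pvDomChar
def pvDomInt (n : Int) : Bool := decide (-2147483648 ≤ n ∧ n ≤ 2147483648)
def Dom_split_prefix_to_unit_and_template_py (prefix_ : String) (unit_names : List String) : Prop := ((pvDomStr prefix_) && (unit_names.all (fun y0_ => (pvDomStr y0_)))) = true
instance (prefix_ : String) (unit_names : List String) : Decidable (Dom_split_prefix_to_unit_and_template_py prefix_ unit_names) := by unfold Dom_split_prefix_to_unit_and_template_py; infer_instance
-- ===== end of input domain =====

-- B replaces A's length-sort + first-match scan with a single unsorted pass keeping the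
-- longest matching unit name (simpler; same return value and same raising inputs).

-- ===== PORT A =====
-- the for-loop of A over the length-sorted (descending) list; ("","") stands for the raise cases, excluded by Pre_
def pvLoopA (p : List Char) : List (List Char) → String × String
  | [] => ("", "")
  | u :: rest =>
    if PySem.Chars.startswith p (u ++ ['_']) then
      let template := PySem.Chars.slice p (some (((u ++ ['_']).length : Nat) : Int)) none
      if template = [] then ("", "")
      else (String.ofList u, String.ofList template)
    else pvLoopA p rest

def split_prefix_to_unit_and_template_py (prefix_ : String) (unit_names : List String) : String × String :=
  pvLoopA prefix_.toList ((PySem.List.sorted unit_names (fun u => PySem.Str.len u) true).map String.toList)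

-- ===== PORT B =====
-- B's single pass: best = None / best_len = -1, replaced on a strictly longer match
def pvLoopB (p : List Char) : Option (List Char) → List (List Char) → Option (List Char)
  | best, [] => best
  | best, u :: rest =>
    if ((match best with | none => (-1 : Int) | some b => (b.length : Int)) < (u.length : Int))
        ∧ PySem.Chars.startswith p (u ++ ['_']) = true then
      pvLoopB p (some u) rest
    else pvLoopB p best rest

def split_prefix_to_unit_and_template_py_alt (prefix_ : String) (unit_names : List String) : String × String :=
  match pvLoopB prefix_.toList none (unit_names.map String.toList) with
  | none => ("", "")
  | some b =>
    let template := PySem.Chars.slice prefix_.toList (some (((b.length + 1 : Nat) : Int))) none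
    if template = [] then ("", "")
    else (String.ofList b, String.ofList template)

-- ===== PRECONDITION & SPEC =====
-- Pre_ excludes exactly the inputs where A raises MergeFolderError: no unit name u with
-- marker u+"_" a prefix of prefix_, or the longest such match leaves an empty template.
def Pre_split_prefix_to_unit_and_template_py (prefix_ : String) (unit_names : List String) : Prop :=
  ∃ u ∈ unit_names, PySem.Chars.startswith prefix_.toList (u.toList ++ ['_']) = true
    ∧ u.toList.length + 1 < prefix_.toList.length
    ∧ ∀ v ∈ unit_names, PySem.Chars.startswith prefix_.toList (v.toList ++ ['_']) = true →
        v.toList.length ≤ u.toList.length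

instance (prefix_ : String) (unit_names : List String) : Decidable (Pre_split_prefix_to_unit_and_template_py prefix_ unit_names) := by
  unfold Pre_split_prefix_to_unit_and_template_py; infer_instance

def pvWitness_split_prefix_to_unit_and_template_py : String × List String := ("a_b", ["a"])

def Spec_split_prefix_to_unit_and_template_py (prefix_ : String) (unit_names : List String) (out : String × String) : Prop := out = split_prefix_to_unit_and_template_py_alt prefix_ unit_names
instance (prefix_ : String) (unit_names : List String) (out : String × String) : Decidable (Spec_split_prefix_to_unit_and_template_py prefix_ unit_names out) := by unfold Spec_split_prefix_to_unit_and_template_py; infer_instance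

-- ===== CLAIM (what is proved, stated in full; the proofs are below) =====
def Claim_equal_split_prefix_to_unit_and_template_py : Prop := ∀ (prefix_ : String) (unit_names : List String), Dom_split_prefix_to_unit_and_template_py prefix_ unit_names → Pre_split_prefix_to_unit_and_template_py prefix_ unit_names → Spec_split_prefix_to_unit_and_template_py prefix_ unit_names (split_prefix_to_unit_and_template_py prefix_ unit_names)

-- ===== LEMMAS AND PROOFS =====

-- two matching markers of equal length are the same unit name
lemma pv_uniq {p u v : List Char} (hu : (u ++ ['_']) <+: p) (hv : (v ++ ['_']) <+: p)
    (hl : u.length = v.length) : u = v := by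
  have h1 : (u ++ ['_']) <+: (v ++ ['_']) :=
    List.prefix_of_prefix_length_le hu hv (by simp [hl])
  have h2 : u ++ ['_'] = v ++ ['_'] := h1.eq_of_length (by simp [hl])
  exact List.append_cancel_right h2

lemma pvA_correct (p u : List Char) (ys : List (List Char))
    (hpw : ys.Pairwise (fun a b => b.length ≤ a.length))
    (hmem : u ∈ ys)
    (hm : PySem.Chars.startswith p (u ++ ['_']) = true)
    (hmax : ∀ v ∈ ys, PySem.Chars.startswith p (v ++ ['_']) = true → v.length ≤ u.length)
    (hlt : u.length + 1 < p.length) :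
    pvLoopA p ys = (String.ofList u, String.ofList (p.drop (u.length + 1))) := by
  induction ys with
  | nil => cases hmem
  | cons h t ih =>
    rw [pvLoopA]
    by_cases hh : PySem.Chars.startswith p (h ++ ['_']) = true
    · -- head matches: it must be u
      have hle : h.length ≤ u.length := hmax h (List.mem_cons_self) hh
      have hge : u.length ≤ h.length := by
        rcases List.mem_cons.mp hmem with rfl | hut
        · exact le_refl _
        · exact (List.pairwise_cons.mp hpw).1 u hut
      have hequ : h = u := pv_uniq ((PySem.Chars.startswith_iff _ _).mp hh)
        ((PySem.Chars.startswith_iff _ _).mp hm) (le_antisymm hle hge)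
      subst hequ
      have hslice : PySem.List.slice p (some ((h.length : Int) + 1)) = List.drop (h.length + 1) p := by
        simpa using PySem.List.slice_from_natCast p (h.length + 1)
      have hne : p.drop (h.length + 1) ≠ [] := by
        simp only [ne_eq, List.drop_eq_nil_iff]
        omega
      simp [hh, hslice, hne]
    · -- head does not match: recurse
      have hut : u ∈ t := by
        rcases List.mem_cons.mp hmem with rfl | hut
        · exact absurd hm hh
        · exact hut
      rw [if_neg hh]
      exact ih (List.pairwise_cons.mp hpw).2 hut
        (fun v hv hsv => hmax v (List.mem_cons_of_mem _ hv) hsv)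

lemma pvB_correct (p u : List Char)
    (hm : PySem.Chars.startswith p (u ++ ['_']) = true) :
    ∀ (ys : List (List Char)) (best : Option (List Char)),
    (∀ v ∈ ys, PySem.Chars.startswith p (v ++ ['_']) = true → v.length ≤ u.length) →
    ((u ∈ ys ∧ ∀ b, best = some b →
        PySem.Chars.startswith p (b ++ ['_']) = true ∧ b.length ≤ u.length)
      ∨ best = some u) →
    pvLoopB p best ys = some u := by
  intro ys
  induction ys with
  | nil =>
    intro best _ hinv
    rcases hinv with ⟨hmem, _⟩ | rfl
    · cases hmem
    · rfl
  | cons v t ih =>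
    intro best hmax hinv
    have hmaxt : ∀ w ∈ t, PySem.Chars.startswith p (w ++ ['_']) = true → w.length ≤ u.length :=
      fun w hw hsw => hmax w (List.mem_cons_of_mem _ hw) hsw
    cases best with
    | none =>
      rcases hinv with ⟨hmem, _⟩ | h
      · simp only [pvLoopB]
        by_cases hsv : PySem.Chars.startswith p (v ++ ['_']) = true
        · rw [if_pos ⟨by omega, hsv⟩]
          have hvle := hmax v List.mem_cons_self hsv
          rcases List.mem_cons.mp hmem with rfl | hut
          · exact ih (some u) hmaxt (Or.inr rfl)
          · exact ih (some v) hmaxt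
              (Or.inl ⟨hut, fun b hb => by cases hb; exact ⟨hsv, hvle⟩⟩)
        · rw [if_neg (by simp [hsv])]
          rcases List.mem_cons.mp hmem with rfl | hut
          · exact absurd hm hsv
          · exact ih none hmaxt (Or.inl ⟨hut, fun b hb => by cases hb⟩)
      · exact absurd h (by simp)
    | some b =>
      simp only [pvLoopB]
      by_cases hcond : ((b.length : Int) < (v.length : Int))
          ∧ PySem.Chars.startswith p (v ++ ['_']) = true
      · rw [if_pos hcond]
        have hvle := hmax v List.mem_cons_self hcond.2
        rcases hinv with ⟨hmem, hb⟩ | heq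
        · rcases List.mem_cons.mp hmem with rfl | hut
          · exact ih (some u) hmaxt (Or.inr rfl)
          · exact ih (some v) hmaxt
              (Or.inl ⟨hut, fun b' hb' => by cases hb'; exact ⟨hcond.2, hvle⟩⟩)
        · -- best already holds u: the strict-length test cannot fire
          exfalso
          obtain rfl : b = u := Option.some.inj heq
          have h1 := hcond.1
          omega
      · rw [if_neg hcond]
        rcases hinv with ⟨hmem, hb⟩ | heq
        · rcases List.mem_cons.mp hmem with rfl | hut
          · -- head is u but was not taken: best already holds u's value
            have hbprops := hb b rfl
            have hble : u.length ≤ b.length := by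
              by_contra hlt'
              exact hcond ⟨by omega, hm⟩
            have hbu : b = u := pv_uniq ((PySem.Chars.startswith_iff _ _).mp hbprops.1)
              ((PySem.Chars.startswith_iff _ _).mp hm) (le_antisymm hble hbprops.2).symm
            subst hbu
            exact ih (some b) hmaxt (Or.inr rfl)
          · exact ih (some b) hmaxt (Or.inl ⟨hut, hb⟩)
        · obtain rfl : b = u := Option.some.inj heq
          exact ih (some b) hmaxt (Or.inr rfl)

-- ===== VERDICT (by name: the statement is the Claim_ definition above) =====
theorem split_prefix_to_unit_and_template_py_spec : Claim_equal_split_prefix_to_unit_and_template_py := by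
  intro prefix_ unit_names _ hpre
  obtain ⟨u, hu, hm, hlt, hmax⟩ := hpre
  unfold Spec_split_prefix_to_unit_and_template_py
  -- A side
  have hA : split_prefix_to_unit_and_template_py prefix_ unit_names
      = (String.ofList u.toList, String.ofList (prefix_.toList.drop (u.toList.length + 1))) := by
    apply pvA_correct
    · rw [List.pairwise_map]
      have := PySem.List.sorted_pairwise_rev unit_names (fun s => PySem.Str.len s)
      refine this.imp ?_
      intro a b hab
      simpa [PySem.Str.len_eq] using hab
    · exact List.mem_map_of_mem ((PySem.List.mem_sorted _ _ _ _).mpr hu)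
    · exact hm
    · intro v hv hsv
      obtain ⟨w, hw, rfl⟩ := List.mem_map.mp hv
      exact hmax w ((PySem.List.mem_sorted _ _ _ _).mp hw) hsv
    · exact hlt
  -- B side
  have hB : pvLoopB prefix_.toList none (unit_names.map String.toList) = some u.toList := by
    apply pvB_correct _ _ hm
    · intro v hv hsv
      obtain ⟨w, hw, rfl⟩ := List.mem_map.mp hv
      exact hmax w hw hsv
    · exact Or.inl ⟨List.mem_map_of_mem hu, fun b hb => by cases hb⟩
  have hslice : PySem.List.slice prefix_.toList (some ((u.toList.length : Int) + 1))
      = List.drop (u.toList.length + 1) prefix_.toList := by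
    simpa using PySem.List.slice_from_natCast prefix_.toList (u.toList.length + 1)
  have hne : prefix_.toList.drop (u.toList.length + 1) ≠ [] := by
    simp only [ne_eq, List.drop_eq_nil_iff]
    omega
  rw [hA]
  unfold split_prefix_to_unit_and_template_py_alt
  rw [hB]
  have hlen : u.toList.length = u.length := by simp
  rw [hlen] at hslice hne
  simp [hslice, hne]
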